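-- pv_equiv track=rewrite | github.com/pypi-data/pypi-mirror-41 | packages/girs/girs-0.1.2-py3-none-any.whl/girs/feat/layers.py | _get_unique_field_names
-- ===== SOURCE A (Python) =====
-- from builtins import str
--
-- def _get_unique_field_names(field_names):
--     """Append a digit to fieldname duplicates
--     :param field_names:
--     :return: list of field names without duplicates
--     """
--     import collections
--     repeated_fieldnames = {c: -2 for c, count in list(collections.Counter(field_names).items()) if count > 1}
--     new_filed_names = list()
--     for field_name in field_names:
--         if field_name in repeated_fieldnames:
--             repeated_fieldnames[field_name] += 1
--             if repeated_fieldnames[field_name] >= 0: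
--                 field_name += str(repeated_fieldnames[field_name])
--         new_filed_names.append(field_name)
--     return new_filed_names
-- ===== SOURCE B (Python) =====
-- def _get_unique_field_names(field_names):
--     """Append a digit to fieldname duplicates.
--
--     Two-stage algorithm: first build an index mapping each name to the ordered
--     list of positions where it occurs; then copy the input and, for every name
--     occurring more than once, overwrite each later occurrence (the j-th one
--     after the first, j starting at 0) with name + str(j)."""
--     names = list(field_names)
--     positions = {}
--     for i, n in enumerate(names):
--         positions.setdefault(n, []).append(i)
--     result = list(names)
--     for n, idxs in positions.items():
--         if len(idxs) > 1:
--             for j, pos in enumerate(idxs[1:]):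
--                 result[pos] = n + str(j)
--     return result
-- ===== Notes on version B (the rewrite author's own statement) =====
-- stated objective: alternative
-- what changed: Replaced A's single stateful scan with running per-name counters by a two-stage algorithm: first build a name-to-ordered-positions index, then copy the input and overwrite, group by group, every later occurrence of a duplicated name with name+str(j).
import Mathlib
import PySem

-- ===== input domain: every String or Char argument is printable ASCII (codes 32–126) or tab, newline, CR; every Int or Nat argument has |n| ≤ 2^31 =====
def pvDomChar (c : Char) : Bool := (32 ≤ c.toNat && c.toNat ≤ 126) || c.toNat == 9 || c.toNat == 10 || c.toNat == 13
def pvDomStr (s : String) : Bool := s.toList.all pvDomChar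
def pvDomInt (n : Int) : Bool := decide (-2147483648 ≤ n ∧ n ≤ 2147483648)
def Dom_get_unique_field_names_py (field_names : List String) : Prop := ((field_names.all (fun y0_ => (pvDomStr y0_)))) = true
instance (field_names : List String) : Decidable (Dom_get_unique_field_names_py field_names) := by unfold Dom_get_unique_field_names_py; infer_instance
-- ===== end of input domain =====

-- B replaces A's single stateful scan (running per-name counters) by a two-stage
-- algorithm: build a name→ordered-positions index, then overwrite later occurrences
-- of duplicated names group by group in a copy of the input (alternative, not faster).

-- ===== PORT A =====
def get_unique_field_names_py (field_names : List String) : List String :=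
  let repeated_fieldnames : PySem.Dict String Int :=
    (((PySem.Dict.counter field_names).items).filter (fun p => p.2 > 1)).foldl
      (fun d p => d.insert p.1 (-2 : Int)) PySem.Dict.empty
  let st := field_names.foldl
    (fun (st : PySem.Dict String Int × List String) field_name =>
      if st.1.contains field_name then
        let rep := st.1.modify field_name 0 (· + 1)
        let fn := if rep.getD field_name 0 ≥ 0 then
                    field_name ++ PySem.Int.toStr (rep.getD field_name 0)
                  else field_name
        (rep, st.2 ++ [fn])
      else (st.1, st.2 ++ [field_name]))
    (repeated_fieldnames, ([] : List String))
  st.2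

-- ===== PORT B =====
-- positions.setdefault(n, []).append(i)  is Dict.modify n [] (· ++ [i]);
-- result[pos] = v with pos a known in-range nonnegative index is List.set pos.toNat v.
def get_unique_field_names_py_alt (field_names : List String) : List String :=
  let names := field_names
  let positions : PySem.Dict String (List Int) :=
    (PySem.List.enumerate names 0).foldl
      (fun d p => d.modify p.2 ([] : List Int) (fun xs => xs ++ [p.1])) PySem.Dict.empty
  positions.items.foldl
    (fun res pr =>
      if pr.2.length > 1 then
        (PySem.List.enumerate (PySem.List.slice pr.2 (some 1) none) 0).foldl
          (fun r q => r.set q.2.toNat (pr.1 ++ PySem.Int.toStr q.1)) res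
      else res)
    names

-- ===== PRECONDITION & SPEC =====
def Spec_get_unique_field_names_py (field_names : List String) (out : List String) : Prop := out = get_unique_field_names_py_alt field_names
instance (field_names : List String) (out : List String) : Decidable (Spec_get_unique_field_names_py field_names out) := by unfold Spec_get_unique_field_names_py; infer_instance

-- ===== CLAIM (what is proved, stated in full; the proofs are below) =====
def Claim_equal_get_unique_field_names_py : Prop := ∀ (field_names : List String), Dom_get_unique_field_names_py field_names → Spec_get_unique_field_names_py field_names (get_unique_field_names_py field_names)

-- ===== LEMMAS AND PROOFS =====

/-- the common characterisation: output at index i for name n -/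
def pvSpecF (l : List String) (i : Nat) (n : String) : String :=
  if 1 < l.count n ∧ 0 < (l.take i).count n then
    n ++ PySem.Int.toStr (((l.take i).count n : Int) - 1)
  else n

/- ---------- A-side proof (stateful scan ⇒ pvSpecF) ---------- -/

lemma foldl_insert_neg2_getD (ps : List (String × Int)) :
    ∀ (d : PySem.Dict String Int) (n : String),
      ((ps.foldl (fun d p => d.insert p.1 (-2 : Int)) d).getD n 0)
        = if n ∈ ps.map Prod.fst then (-2 : Int) else d.getD n 0 := by
  induction ps with
  | nil => intro d n; simp [List.foldl]
  | cons x ps ih =>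
    intro d n
    simp only [List.foldl, ih, List.map, List.mem_cons]
    by_cases h1 : n ∈ ps.map Prod.fst
    · simp [h1]
    · by_cases h2 : n = x.1 <;> simp [h1, h2, PySem.Dict.getD_insert]

lemma foldl_insert_neg2_contains (ps : List (String × Int)) :
    ∀ (d : PySem.Dict String Int) (n : String),
      ((ps.foldl (fun d p => d.insert p.1 (-2 : Int)) d).contains n)
        = (decide (n ∈ ps.map Prod.fst) || d.contains n) := by
  induction ps with
  | nil => intro d n; simp [List.foldl]
  | cons x ps ih =>
    intro d n
    simp only [List.foldl, ih, List.map, List.mem_cons]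
    by_cases h1 : n ∈ ps.map Prod.fst
    · simp [h1]
    · by_cases h2 : n = x.1 <;>
        simp [h1, h2, PySem.Dict.contains_insert, BEq.beq]

lemma mem_dup_keys (l : List String) (n : String) :
    n ∈ (((PySem.Dict.counter l).items).filter (fun p => p.2 > 1)).map Prod.fst
      ↔ 1 < l.count n := by
  rw [PySem.Dict.items_counter, List.filter_map, List.map_map]
  simp only [Function.comp_def, List.mem_map, List.mem_filter, decide_eq_true_eq]
  constructor
  · rintro ⟨k, ⟨hk, hgt⟩, rfl⟩
    exact_mod_cast hgt
  · intro h
    refine ⟨n, ⟨?_, by exact_mod_cast h⟩, rfl⟩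
    exact (PySem.Set.mem_ofList _ _).2 (List.count_pos_iff.mp (by omega))

/-- main loop invariant for A -/
lemma loopA (l : List String) (q : List String) :
    ∀ (p : List String) (rep : PySem.Dict String Int) (acc : List String),
      l = p ++ q →
      (∀ n, rep.contains n = decide (1 < l.count n)) →
      (∀ n, 1 < l.count n → rep.getD n 0 = -2 + (p.count n : Int)) →
      (q.foldl
        (fun (st : PySem.Dict String Int × List String) field_name =>
          if st.1.contains field_name then
            let rep := st.1.modify field_name 0 (· + 1)
            let fn := if rep.getD field_name 0 ≥ 0 then
                        field_name ++ PySem.Int.toStr (rep.getD field_name 0)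
                      else field_name
            (rep, st.2 ++ [fn])
          else (st.1, st.2 ++ [field_name]))
        (rep, acc)).2
      = acc ++ (PySem.List.enumerate q (p.length : Int)).map
          (fun pr => pvSpecF l pr.1.toNat pr.2) := by
  induction q with
  | nil => intro p rep acc _ _ _; simp [PySem.List.enumerate]
  | cons x q ih =>
    intro p rep acc hl hc hv
    have htake : l.take p.length = p := by
      subst hl; simp
    rw [PySem.List.enumerate_cons]
    simp only [List.foldl, List.map]
    by_cases hdup : 1 < l.count x
    · have hcx : rep.contains x = true := by rw [hc]; simpa using hdup
      rw [if_pos hcx]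
      have hval : (rep.modify x 0 (· + 1)).getD x 0 = (p.count x : Int) - 1 := by
        rw [PySem.Dict.getD_modify_self, hv x hdup]; ring
      have hspec : (if (rep.modify x 0 (· + 1)).getD x 0 ≥ 0 then
              x ++ PySem.Int.toStr ((rep.modify x 0 (· + 1)).getD x 0)
            else x) = pvSpecF l ((p.length : Int)).toNat x := by
        rw [hval]
        simp only [pvSpecF, Int.toNat_natCast, htake]
        by_cases hpos : 0 < p.count x
        · rw [if_pos (by omega), if_pos ⟨hdup, hpos⟩]
        · rw [if_neg (by omega), if_neg (by tauto)]
      rw [ih (p ++ [x]) (rep.modify x 0 (· + 1)) (acc ++ [_]) (by simp [hl]) ?_ ?_]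
      · simp only [hspec, List.append_assoc, List.singleton_append,
          List.length_append, List.length_singleton]
        norm_num
      · intro n; rw [PySem.Dict.contains_modify, hc]
        by_cases h : n = x <;> simp [h, hdup]
      · intro n hn
        by_cases h : n = x
        · subst h
          rw [PySem.Dict.getD_modify_self, hv n hn, List.count_append]
          simp
          omega
        · rw [PySem.Dict.getD_modify_of_ne _ _ _ h, hv n hn,
            List.count_append]
          simp [List.count_eq_zero]
          exact h
    · have hcx : rep.contains x = false := by rw [hc]; simpa using hdup
      rw [if_neg (by simp [hcx])]
      have hspec : pvSpecF l ((p.length : Int)).toNat x = x := by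
        simp only [pvSpecF]
        rw [if_neg (by tauto)]
      rw [ih (p ++ [x]) rep (acc ++ [x]) (by simp [hl]) hc ?_]
      · simp only [hspec, List.append_assoc, List.singleton_append,
          List.length_append, List.length_singleton]
        norm_num
      · intro n hn
        have hne : n ≠ x := by rintro rfl; exact hdup hn
        rw [hv n hn, List.count_append]
        simp [List.count_eq_zero]
        exact hne

lemma portA_eq_spec (l : List String) :
    get_unique_field_names_py l
      = (PySem.List.enumerate l 0).map (fun pr => pvSpecF l pr.1.toNat pr.2) := by
  show (l.foldl
      (fun (st : PySem.Dict String Int × List String) field_name =>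
        if st.1.contains field_name then
          let rep := st.1.modify field_name 0 (· + 1)
          let fn := if rep.getD field_name 0 ≥ 0 then
                      field_name ++ PySem.Int.toStr (rep.getD field_name 0)
                    else field_name
          (rep, st.2 ++ [fn])
        else (st.1, st.2 ++ [field_name]))
      ((((PySem.Dict.counter l).items).filter (fun p => p.2 > 1)).foldl
        (fun d p => d.insert p.1 (-2 : Int)) PySem.Dict.empty, [])).2
    = _
  rw [loopA l l [] _ [] (by simp) ?_ ?_]
  · simp
  · intro n
    rw [foldl_insert_neg2_contains, PySem.Dict.contains_empty]
    simp [mem_dup_keys]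
  · intro n hn
    rw [foldl_insert_neg2_getD, if_pos ((mem_dup_keys l n).2 hn)]
    simp

/- ---------- B-side proof (index + overwrite pass ⇒ pvSpecF) ---------- -/

/-- positions of the occurrences of `n` in `l`, in order (the index B builds) -/
def posList (l : List String) (n : String) : List Int :=
  ((PySem.List.enumerate l 0).filter (fun p => p.2 == n)).map (·.1)

lemma posList_append (l : List String) (x : String) (n : String) :
    posList (l ++ [x]) n
      = posList l n ++ (if x = n then [(l.length : Int)] else []) := by
  unfold posList
  rw [PySem.List.enumerate_append, List.filter_append, List.map_append]
  congr 1
  by_cases h : x = n <;>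
    simp [PySem.List.enumerate, PySem.List.enumerate_cons, h]

/-- packaged occurrence structure of posList -/
lemma posList_struct (l : List String) (n : String) :
    (posList l n).length = l.count n
    ∧ (∀ j (hj : j < (posList l n).length), ∃ k : Nat, k < l.length
        ∧ (posList l n)[j] = (k : Int) ∧ l[k]? = some n ∧ (l.take k).count n = j)
    ∧ (∀ k, k < l.length → l[k]? = some n →
        (posList l n)[(l.take k).count n]? = some (k : Int)) := by
  induction l using List.reverseRecOn with
  | nil => simp [posList, PySem.List.enumerate]
  | append_singleton l x ih =>
    obtain ⟨hlen, hfwd, hbwd⟩ := ih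
    rw [posList_append]
    by_cases hx : x = n
    · subst hx
      refine ⟨by simp [hlen, List.count_append], ?_, ?_⟩
      · intro j hj
        simp only [List.length_append, List.length_singleton] at hj
        by_cases hjold : j < (posList l x).length
        · obtain ⟨k, hk, hv, hg, hcnt⟩ := hfwd j hjold
          refine ⟨k, by simp; omega, ?_, ?_, ?_⟩
          · rw [List.getElem_append_left hjold]; exact hv
          · rw [List.getElem?_append_left hk]; exact hg
          · rw [List.take_append_of_le_length (by omega)]; exact hcnt
        · have hj0 : j = (posList l x).length := by
            simp at hj; omega
          refine ⟨l.length, by simp, ?_, ?_, ?_⟩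
          · subst hj0
            rw [List.getElem_append_right (le_refl _)]
            simp
          · simp
          · rw [List.take_append_of_le_length (le_refl _)]
            simp [hj0, hlen]
      · intro k hk hg
        simp only [List.length_append, List.length_singleton] at hk
        by_cases hkold : k < l.length
        · rw [List.getElem?_append_left hkold] at hg
          have h := hbwd k hkold hg
          have hlt : (l.take k).count x < (posList l x).length :=
            (List.getElem?_eq_some_iff.mp h).1
          rw [List.take_append_of_le_length (by omega),
            List.getElem?_append_left (by simpa using hlt)]
          simpa using h
        · have hkl : k = l.length := by omega
          subst hkl
          rw [List.take_append_of_le_length (le_refl _), List.take_length]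
          have hcl : List.count x l = (posList l x).length := hlen.symm
          rw [hcl, List.getElem?_append_right (by simp)]
          simp
    · refine ⟨by simp [hlen, List.count_append, hx], ?_, ?_⟩
      · intro j hj
        simp only [if_neg hx, List.append_nil] at hj ⊢
        obtain ⟨k, hk, hv, hg, hcnt⟩ := hfwd j hj
        refine ⟨k, by simp; omega, hv, ?_, ?_⟩
        · rw [List.getElem?_append_left hk]; exact hg
        · rw [List.take_append_of_le_length (by omega)]; exact hcnt
      · intro k hk hg
        simp only [List.length_append, List.length_singleton] at hk
        by_cases hkold : k < l.length
        · rw [List.getElem?_append_left hkold] at hg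
          have h := hbwd k hkold hg
          rw [List.take_append_of_le_length (by omega)]
          simpa [if_neg hx] using h
        · have hkl : k = l.length := by omega
          subst hkl
          rw [List.getElem?_append_right (le_refl _)] at hg
          simp at hg
          exact absurd hg hx

lemma posList_length (l : List String) (n : String) :
    (posList l n).length = l.count n := (posList_struct l n).1

lemma posList_nodup (l : List String) (n : String) : (posList l n).Nodup := by
  rw [List.nodup_iff_injective_get]
  intro a b hab
  obtain ⟨ka, hka, hva, _, hca⟩ := (posList_struct l n).2.1 a.1 a.2
  obtain ⟨kb, hkb, hvb, _, hcb⟩ := (posList_struct l n).2.1 b.1 b.2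
  simp only [List.get_eq_getElem] at hab
  rw [hva, hvb] at hab
  have : ka = kb := by exact_mod_cast hab
  subst this
  exact Fin.ext (by rw [← hca, ← hcb])

lemma posList_nonneg (l : List String) (n : String) :
    ∀ x ∈ posList l n, 0 ≤ x := by
  intro x hx
  obtain ⟨j, hj, hv⟩ := List.getElem_of_mem hx
  obtain ⟨k, _, hv', _, _⟩ := (posList_struct l n).2.1 j hj
  rw [hv] at hv'; rw [hv']; positivity

/-- length is preserved by the write loop -/
lemma write_length (n : String) :
    ∀ (pairs : List (Int × Int)) (res : List String),
      (pairs.foldl (fun r q => r.set q.2.toNat (n ++ PySem.Int.toStr q.1)) res).length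
        = res.length := by
  intro pairs
  induction pairs with
  | nil => intro res; rfl
  | cons q rest ih => intro res; simp [List.foldl, ih]

/-- the write loop does not touch indices outside idxs -/
lemma write_miss (n : String) :
    ∀ (idxs : List Int) (res : List String) (s : Int) (i : Nat),
      (∀ x ∈ idxs, 0 ≤ x) → (i : Int) ∉ idxs →
      ((PySem.List.enumerate idxs s).foldl
        (fun r q => r.set q.2.toNat (n ++ PySem.Int.toStr q.1)) res)[i]? = res[i]? := by
  intro idxs
  induction idxs with
  | nil => intro res s i _ _; simp [PySem.List.enumerate]
  | cons x rest ih =>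
    intro res s i hnn hmem
    rw [PySem.List.enumerate_cons]
    simp only [List.foldl]
    rw [ih _ _ _ (fun y hy => hnn y (List.mem_cons_of_mem _ hy))
          (fun h => hmem (List.mem_cons_of_mem _ h))]
    have hxi : x.toNat ≠ i := by
      intro h
      apply hmem
      have : x = (i : Int) := by
        have := hnn x (List.mem_cons_self)
        omega
      rw [this]; exact List.mem_cons_self
    rw [List.getElem?_set_ne hxi]

/-- the write loop sets position idxs[j] to g (s + j) -/
lemma write_hit (n : String) :
    ∀ (idxs : List Int) (res : List String) (s : Int) (i : Nat),
      i < res.length →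
      (∀ x ∈ idxs, 0 ≤ x) → idxs.Nodup →
      ∀ j (hj : j < idxs.length), idxs[j] = (i : Int) →
      ((PySem.List.enumerate idxs s).foldl
        (fun r q => r.set q.2.toNat (n ++ PySem.Int.toStr q.1)) res)[i]?
        = some (n ++ PySem.Int.toStr (s + j)) := by
  intro idxs
  induction idxs with
  | nil => intro res s i _ _ _ j hj; simp at hj
  | cons x rest ih =>
    intro res s i hi hnn hnd j hj hv
    rw [PySem.List.enumerate_cons]
    simp only [List.foldl]
    match j with
    | 0 =>
      simp only [List.getElem_cons_zero] at hv
      subst hv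
      have hnotin : ((i : Nat) : Int) ∉ rest := by
        simp only [Int.toNat_natCast] at *
        exact (List.nodup_cons.mp hnd).1
      rw [write_miss n rest _ _ _ (fun y hy => hnn y (List.mem_cons_of_mem _ hy)) hnotin]
      rw [Int.toNat_natCast, List.getElem?_set_self (by omega)]
      simp
    | j + 1 =>
      simp only [List.getElem_cons_succ] at hv
      have := ih (res.set x.toNat (n ++ PySem.Int.toStr s)) (s + 1) i (by simpa using hi)
        (fun y hy => hnn y (List.mem_cons_of_mem _ hy))
        (List.nodup_cons.mp hnd).2 j (by simpa using hj) hv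
      rw [this]
      congr 2
      push_cast
      ring

/-- effect of one group's write pass, expressed through occurrence counts -/
lemma write_group (l : List String) (n : String) (res : List String)
    (hres : res.length = l.length) (i : Nat) (hi : i < l.length) :
    ((PySem.List.enumerate ((posList l n).drop 1) 0).foldl
        (fun r q => r.set q.2.toNat (n ++ PySem.Int.toStr q.1)) res)[i]?
      = if l[i] = n ∧ 0 < (l.take i).count n then
          some (n ++ PySem.Int.toStr (((l.take i).count n : Int) - 1))
        else res[i]? := by
  have hnn : ∀ x ∈ (posList l n).drop 1, 0 ≤ x :=
    fun x hx => posList_nonneg l n x (List.mem_of_mem_drop hx)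
  by_cases hc : l[i] = n ∧ 0 < (l.take i).count n
  · obtain ⟨hg, hcnt⟩ := hc
    obtain ⟨hj, hv⟩ := List.getElem?_eq_some_iff.mp
      ((posList_struct l n).2.2 i hi (by rw [List.getElem?_eq_getElem hi, hg]))
    have hj1 : (l.take i).count n - 1 < ((posList l n).drop 1).length := by
      rw [List.length_drop]; omega
    have hv1? : ((posList l n).drop 1)[(l.take i).count n - 1]? = some (i : Int) := by
      rw [List.getElem?_drop]
      have h1 : 1 + ((l.take i).count n - 1) = (l.take i).count n := by omega
      rw [h1, List.getElem?_eq_getElem hj, hv]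
    obtain ⟨_, hv1⟩ := List.getElem?_eq_some_iff.mp hv1?
    rw [write_hit _ _ _ _ _ (by omega) hnn
        ((posList_nodup l n).sublist (List.drop_sublist 1 _)) _ hj1 hv1]
    rw [if_pos ⟨hg, hcnt⟩]
    congr 2
    push_cast [Nat.cast_sub (by omega : 1 ≤ (l.take i).count n)]
    ring
  · rw [if_neg hc, write_miss _ _ _ _ _ hnn]
    intro hmem
    obtain ⟨j1, hj1, hv1⟩ := List.getElem_of_mem hmem
    have hv1? : (posList l n)[1 + j1]? = some (i : Int) := by
      rw [← List.getElem?_drop, List.getElem?_eq_getElem hj1, hv1]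
    obtain ⟨hlt, hv'⟩ := List.getElem?_eq_some_iff.mp hv1?
    obtain ⟨k, hk, hv'', hg', hcnt'⟩ := (posList_struct l n).2.1 (1 + j1) hlt
    have hik : (i : Int) = (k : Int) := by rw [← hv', hv'']
    have hik' : i = k := by exact_mod_cast hik
    subst hik'
    apply hc
    constructor
    · have := hg'; simp [List.getElem?_eq_getElem hi] at this; exact this
    · omega

/-- outer loop over the (distinct) names -/
lemma outer_loop (l : List String) :
    ∀ (ks : List String) (res : List String),
      ks.Nodup →
      res.length = l.length →
      (∀ i (hi : i < l.length),
        res[i]? = some (if l[i] ∈ ks then l[i] else pvSpecF l i l[i])) →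
      ∀ i (hi : i < l.length),
        (ks.foldl
          (fun res n =>
            if (posList l n).length > 1 then
              (PySem.List.enumerate (PySem.List.slice (posList l n) (some 1) none) 0).foldl
                (fun r q => r.set q.2.toNat (n ++ PySem.Int.toStr q.1)) res
            else res)
          res)[i]? = some (pvSpecF l i l[i]) := by
  intro ks
  induction ks with
  | nil => intro res _ _ hinv i hi; simpa using hinv i hi
  | cons n ks ih =>
    intro res hnd hlen hinv i hi
    simp only [List.foldl]
    have hnd' := List.nodup_cons.mp hnd
    have hslice : PySem.List.slice (posList l n) (some 1) none = (posList l n).drop 1 := by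
      rw [PySem.List.slice_from_one, List.drop_one]
    by_cases hguard : (posList l n).length > 1
    · rw [if_pos hguard, hslice]
      apply ih _ hnd'.2 (by rw [write_length]; exact hlen)
      intro k hk
      rw [write_group l n res hlen k hk]
      by_cases hkn : l[k] = n
      · have hcount : 1 < l.count n := by rw [← posList_length]; exact hguard
        have hfin : l[k] ∉ ks := fun h => hnd'.1 (hkn ▸ h)
        by_cases hpos : 0 < (l.take k).count n
        · rw [if_pos ⟨hkn, hpos⟩, if_neg hfin]
          simp only [pvSpecF, hkn]
          rw [if_pos ⟨hcount, hpos⟩]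
        · rw [if_neg (fun h => hpos h.2), hinv k hk,
            if_pos (List.mem_cons.mpr (Or.inl hkn)), if_neg hfin]
          simp only [pvSpecF, hkn]
          rw [if_neg (fun h => hpos h.2)]
      · rw [if_neg (fun h => hkn h.1), hinv k hk]
        by_cases hmem : l[k] ∈ ks
        · rw [if_pos (List.mem_cons.mpr (Or.inr hmem)), if_pos hmem]
        · rw [if_neg (by simp [List.mem_cons, hkn, hmem]), if_neg hmem]
    · rw [if_neg hguard]
      apply ih _ hnd'.2 hlen
      intro k hk
      rw [hinv k hk]
      by_cases hkn : l[k] = n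
      · have hcount : ¬ 1 < l.count n := by rw [← posList_length]; exact hguard
        have hfin : l[k] ∉ ks := fun h => hnd'.1 (hkn ▸ h)
        rw [if_pos (List.mem_cons.mpr (Or.inl hkn)), if_neg hfin]
        simp only [pvSpecF, hkn]
        rw [if_neg (fun h => hcount h.1)]
      · by_cases hmem : l[k] ∈ ks
        · rw [if_pos (List.mem_cons.mpr (Or.inr hmem)), if_pos hmem]
        · rw [if_neg (by simp [List.mem_cons, hkn, hmem]), if_neg hmem]

lemma outer_len (l : List String) :
    ∀ (ks : List String) (res : List String),
      (ks.foldl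
        (fun res n =>
          if (posList l n).length > 1 then
            (PySem.List.enumerate (PySem.List.slice (posList l n) (some 1) none) 0).foldl
              (fun r q => r.set q.2.toNat (n ++ PySem.Int.toStr q.1)) res
          else res)
        res).length = res.length := by
  intro ks
  induction ks with
  | nil => intro res; rfl
  | cons n ks ih =>
    intro res
    simp only [List.foldl]
    by_cases hguard : (posList l n).length > 1
    · rw [if_pos hguard, ih, write_length]
    · rw [if_neg hguard, ih]

/-- lookup in the positions dict built by B's first pass -/
lemma getD_posfold :
    ∀ (l : List (Int × String)) (d : PySem.Dict String (List Int)) (n : String),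
      (l.foldl (fun d p => d.modify p.2 ([] : List Int) (fun xs => xs ++ [p.1])) d).getD n []
        = d.getD n [] ++ (l.filter (fun p => p.2 == n)).map (·.1) := by
  intro l
  induction l with
  | nil => intro d n; simp
  | cons p l ih =>
    intro d n
    simp only [List.foldl, List.filter]
    rw [ih, PySem.Dict.getD_modify]
    by_cases h : p.2 = n
    · rw [if_pos h.symm]
      simp [h]
    · rw [if_neg (fun hh => h hh.symm)]
      have hb : (p.2 == n) = false := beq_eq_false_iff_ne.mpr h
      simp [hb]

lemma portB_eq_spec (l : List String) :
    get_unique_field_names_py_alt l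
      = (PySem.List.enumerate l 0).map (fun pr => pvSpecF l pr.1.toNat pr.2) := by
  show (((PySem.List.enumerate l 0).foldl
      (fun d p => d.modify p.2 ([] : List Int) (fun xs => xs ++ [p.1]))
      PySem.Dict.empty).items.foldl
      (fun res pr =>
        if pr.2.length > 1 then
          (PySem.List.enumerate (PySem.List.slice pr.2 (some 1) none) 0).foldl
            (fun r q => r.set q.2.toNat (pr.1 ++ PySem.Int.toStr q.1)) res
        else res) l) = _
  -- characterise the positions dict
  set d := (PySem.List.enumerate l 0).foldl
      (fun d p => d.modify p.2 ([] : List Int) (fun xs => xs ++ [p.1])) PySem.Dict.empty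
    with hd
  have hkeys : d.keys = PySem.Set.ofList l := by
    rw [hd, PySem.Dict.keys_foldl_modify_key]
    rw [PySem.List.map_snd_enumerate, PySem.Dict.keys_empty, PySem.Set.update_nil_left]
  have hknd : d.keys.Nodup := by rw [hkeys]; exact PySem.Set.nodup_ofList l
  have hget : ∀ n, d.getD n [] = posList l n := by
    intro n
    rw [hd, getD_posfold, PySem.Dict.getD_empty]
    unfold posList
    simp
  have hitems : d.items = (PySem.Set.ofList l).map (fun n => (n, posList l n)) := by
    rw [PySem.Dict.items_eq_map_keys d hknd []]
    rw [hkeys]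
    exact List.map_congr_left (fun n _ => by rw [hget])
  rw [hitems, List.foldl_map]
  -- both sides elementwise
  apply List.ext_getElem?
  intro i
  by_cases hi : i < l.length
  · have hR : ((PySem.List.enumerate l 0).map (fun pr => pvSpecF l pr.1.toNat pr.2))[i]?
        = some (pvSpecF l i l[i]) := by
      rw [List.getElem?_map, PySem.List.getElem?_enumerate,
        List.getElem?_eq_getElem hi]
      simp
    rw [hR]
    exact outer_loop l (PySem.Set.ofList l) l (PySem.Set.nodup_ofList l) rfl
      (fun k hk => by rw [List.getElem?_eq_getElem hk,
        if_pos ((PySem.Set.mem_ofList _ _).2 (List.getElem_mem hk))]) i hi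
  · rw [List.getElem?_eq_none (by rw [outer_len]; omega),
      List.getElem?_eq_none (by simp [PySem.List.length_enumerate]; omega)]

-- ===== VERDICT (by name: the statement is the Claim_ definition above) =====
theorem get_unique_field_names_py_spec : Claim_equal_get_unique_field_names_py := by
  intro l _
  unfold Spec_get_unique_field_names_py
  rw [portA_eq_spec, portB_eq_spec]
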